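-- pv_equiv track=rewrite | github.com/hekticxox/wallet_tool | scripts/ultimate_precision_harvester.py | is_interesting_number
-- ===== SOURCE A (Python) =====
-- def is_interesting_number(num):
--     """Check if number has interesting mathematical properties"""
--     # Check for powers of small numbers
--     for base in [2, 3, 5, 7, 11]:
--         power = 1
--         while base ** power < num:
--             power += 1
--             if base ** power == num:
--                 return True
--
--     # Check if close to powers of 2
--     log2_val = num.bit_length() - 1
--     if abs(num - (2 ** log2_val)) < 1000:
--         return True
--
--     return False
-- ===== SOURCE B (Python) =====
-- def is_interesting_number(num):
--     """Check if number has interesting mathematical properties"""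
--     # Power check by trial division: strip all factors of base and see if 1 remains
--     # (only entered for num >= base**2, matching the 'exponent >= 2' powers).
--     for base in (2, 3, 5, 7, 11):
--         if num >= base * base:
--             n = num
--             while n % base == 0:
--                 n //= base
--             if n == 1:
--                 return True
--     # Proximity to the power of 2 below: scaled by two so the test is exact integer
--     # arithmetic for every num, with no float corner at bit_length zero.
--     return abs(2 * num - (1 << num.bit_length())) < 2000
-- ===== Notes on version B (the rewrite author's own statement) =====
-- stated objective: alternative
-- what changed: The power-of-base test divides num down by each base and checks that 1 remains (trial division) instead of generating base**power upward and comparing, and the power-of-2 proximity test is done by one integer shift scaled by 2 instead of 2**(bit_length-1) with its float corner at bit_length zero.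
import Mathlib
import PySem

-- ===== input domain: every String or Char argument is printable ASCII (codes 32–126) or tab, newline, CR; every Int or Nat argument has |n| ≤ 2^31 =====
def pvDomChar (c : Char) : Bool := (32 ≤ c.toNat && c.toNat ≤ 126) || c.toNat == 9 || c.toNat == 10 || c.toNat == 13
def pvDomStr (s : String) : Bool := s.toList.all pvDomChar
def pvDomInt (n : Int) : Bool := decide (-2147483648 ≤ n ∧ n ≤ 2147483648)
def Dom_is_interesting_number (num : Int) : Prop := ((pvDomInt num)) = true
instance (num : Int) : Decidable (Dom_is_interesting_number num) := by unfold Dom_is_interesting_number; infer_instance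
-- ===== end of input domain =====

-- B replaces A's multiply-upward power scan by trial division and the float-tinged
-- 2**(bit_length-1) proximity test by an exact doubled integer shift test (alternative).

-- ===== PORT A =====
-- A's inner while loop: power = 1; while base**power < num: power += 1; if base**power == num: return True.
-- The proof argument hb only makes termination provable (base is always a literal ≥ 2); it changes no computation.
def aLoop (base num : Int) (power : Nat) (hb : 2 ≤ base) : Bool :=
  if h : base ^ power < num then
    if base ^ (power + 1) = num then true
    else aLoop base num (power + 1) hb
  else false
termination_by num.toNat - power
decreasing_by
  have h1 : (2:Int) ^ power ≤ base ^ power := pow_le_pow_left₀ (by omega) hb power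
  have h2 : ((power:Int)) < 2 ^ power := by exact_mod_cast Nat.lt_two_pow_self
  omega

def is_interesting_number (num : Int) : Bool :=
  -- for base in [2, 3, 5, 7, 11]: … return True  (unrolled literal list, same order)
  if aLoop 2 num 1 (by norm_num) then true
  else if aLoop 3 num 1 (by norm_num) then true
  else if aLoop 5 num 1 (by norm_num) then true
  else if aLoop 7 num 1 (by norm_num) then true
  else if aLoop 11 num 1 (by norm_num) then true
  else
    -- log2_val = num.bit_length() - 1; abs(num - 2**log2_val) < 1000
    -- bit_length = 0 only at num = 0, where Python computes the float |0 - 0.5| < 1000 = True;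
    -- that single case is written out (exact), all other cases are the integer test.
    let bl := PySem.Int.bitLength num
    if bl = 0 then true
    else decide (|num - 2 ^ (bl - 1)| < 1000)

-- ===== PORT B =====
-- B's inner while loop: while n % base == 0: n //= base.  The guards 2 ≤ base ∧ 0 < n only
-- make the recursion total (both always hold when B calls it); they change no computation.
def stripLoop (base n : Int) : Int :=
  if h : 2 ≤ base ∧ 0 < n ∧ PySem.Int.mod n base = 0 then  -- totality guards; always hold when called
    stripLoop base (PySem.Int.floordiv n base)
  else n
termination_by n.toNat
decreasing_by
  obtain ⟨hb, hn, -⟩ := h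
  rw [PySem.Int.floordiv_eq_ediv_of_pos (by omega)]
  have hq0 : 0 ≤ n / base := Int.ediv_nonneg (by omega) (by omega)
  have h1 : n / base * base ≤ n := Int.ediv_mul_le n (by omega)
  have h2 : n / base * 2 ≤ n / base * base :=
    mul_le_mul_of_nonneg_left hb hq0
  omega

def is_interesting_number_alt (num : Int) : Bool :=
  (([2, 3, 5, 7, 11] : List Int).any fun base =>
    decide (base * base ≤ num) && (stripLoop base num == 1))
  || decide (|2 * num - 2 ^ PySem.Int.bitLength num| < 2000)

-- ===== PRECONDITION & SPEC =====
def Spec_is_interesting_number (num : Int) (out : Bool) : Prop := out = is_interesting_number_alt num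
instance (num : Int) (out : Bool) : Decidable (Spec_is_interesting_number num out) := by unfold Spec_is_interesting_number; infer_instance

-- ===== CLAIM (what is proved, stated in full; the proofs are below) =====
def Claim_equal_is_interesting_number : Prop := ∀ (num : Int), Dom_is_interesting_number num → Spec_is_interesting_number num (is_interesting_number num)

-- ===== LEMMAS AND PROOFS =====

-- A's loop returns true iff num is base^k for some exponent k above the starting power.
theorem aLoop_iff (base num : Int) (hb : 2 ≤ base) (p : Nat) :
    aLoop base num p hb = true ↔ ∃ k : Nat, p < k ∧ base ^ k = num := by
  have H : ∀ d p, num.toNat - p = d →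
      (aLoop base num p hb = true ↔ ∃ k : Nat, p < k ∧ base ^ k = num) := by
    intro d
    induction d using Nat.strong_induction_on with
    | _ d IH =>
      intro p hd
      rw [aLoop]
      split
      case isTrue h =>
        split
        case isTrue heq =>
          constructor
          · intro _; exact ⟨p + 1, by omega, heq⟩
          · intro _; rfl
        case isFalse heq =>
          have h1 : (2:Int) ^ p ≤ base ^ p := pow_le_pow_left₀ (by omega) hb p
          have h2 : ((p:Int)) < 2 ^ p := by exact_mod_cast Nat.lt_two_pow_self
          have hlt : num.toNat - (p + 1) < d := by omega
          rw [IH _ hlt (p + 1) rfl]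
          constructor
          · rintro ⟨k, hk, he⟩; exact ⟨k, by omega, he⟩
          · rintro ⟨k, hk, he⟩
            refine ⟨k, ?_, he⟩
            rcases Nat.lt_or_ge (p + 1) k with h' | h'
            · exact h'
            · have hkp : k = p + 1 := by omega
              subst hkp
              exact absurd he heq
      case isFalse h =>
        simp only [Bool.false_eq_true, false_iff]
        rintro ⟨k, hk, he⟩
        have hmono : base ^ p < base ^ k := pow_lt_pow_right₀ (by omega : 1 < base) hk
        omega
  exact H _ p rfl

-- B's strip loop reaches 1 iff n is a pure power of base.
theorem strip_eq_one_iff (base n : Int) (hb : 2 ≤ base) (hn : 0 < n) :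
    stripLoop base n = 1 ↔ ∃ j : Nat, base ^ j = n := by
  have H : ∀ d (n : Int), 0 < n → n.toNat = d →
      (stripLoop base n = 1 ↔ ∃ j : Nat, base ^ j = n) := by
    intro d
    induction d using Nat.strong_induction_on with
    | _ d IH =>
      intro n hn hd
      rw [stripLoop]
      split
      case isTrue h =>
        obtain ⟨-, -, hmod⟩ := h
        have hfd : PySem.Int.floordiv n base = n / base :=
          PySem.Int.floordiv_eq_ediv_of_pos (by omega)
        have hmod' : n % base = 0 := by
          rw [PySem.Int.mod_eq_emod_of_pos (by omega)] at hmod; exact hmod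
        have hdvd : base ∣ n := Int.dvd_of_emod_eq_zero hmod'
        have hmul : base * (n / base) = n := Int.mul_ediv_cancel' hdvd
        have hq0 : 0 ≤ n / base := Int.ediv_nonneg (by omega) (by omega)
        have hqpos : 0 < n / base := by
          rcases eq_or_lt_of_le hq0 with h0 | h0
          · rw [← h0] at hmul; simp at hmul; omega
          · exact h0
        have h2q : 2 * (n / base) ≤ base * (n / base) :=
          mul_le_mul_of_nonneg_right hb hq0
        have hlt : (n / base).toNat < d := by omega
        rw [hfd, IH _ hlt (n / base) hqpos rfl]
        constructor
        · rintro ⟨j, he⟩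
          refine ⟨j + 1, ?_⟩
          rw [pow_succ, he, mul_comm, hmul]
        · rintro ⟨j, he⟩
          cases j with
          | zero =>
            simp only [pow_zero] at he
            have h1d : (1:Int) / base = 0 := Int.ediv_eq_zero_of_lt (by omega) (by omega)
            rw [← he] at hmul
            rw [h1d] at hmul
            omega
          | succ j' =>
            refine ⟨j', ?_⟩
            rw [pow_succ] at he
            have : n / base = base ^ j' := by
              rw [← he, Int.mul_ediv_cancel _ (by omega : base ≠ 0)]
            omega
      case isFalse h =>
        constructor
        · intro h1
          exact ⟨0, by simp [h1]⟩
        · rintro ⟨j, he⟩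
          cases j with
          | zero => simpa using he.symm
          | succ j' =>
            exfalso
            apply h
            refine ⟨hb, hn, ?_⟩
            rw [PySem.Int.mod_eq_emod_of_pos (by omega)]
            exact Int.emod_eq_zero_of_dvd ⟨base ^ j', by rw [← he, pow_succ]; ring⟩
  exact H _ n hn rfl

-- per base: A's scan agrees with B's trial-division test.
theorem loop_eq (base num : Int) (hb : 2 ≤ base) :
    aLoop base num 1 hb = (decide (base * base ≤ num) && (stripLoop base num == 1)) := by
  rw [Bool.eq_iff_iff]
  rw [aLoop_iff base num hb 1]
  simp only [Bool.and_eq_true, decide_eq_true_eq, beq_iff_eq]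
  have h4 : (4:Int) ≤ base * base := by nlinarith
  constructor
  · rintro ⟨k, hk, he⟩
    have hge : base * base ≤ num := by
      have hmono : base ^ 2 ≤ base ^ k := pow_le_pow_right₀ (by omega : 1 ≤ base) hk
      rw [pow_two] at hmono
      omega
    have hn : 0 < num := by omega
    exact ⟨hge, (strip_eq_one_iff base num hb hn).mpr ⟨k, he⟩⟩
  · rintro ⟨hge, hs⟩
    have hn : 0 < num := by omega
    obtain ⟨j, he⟩ := (strip_eq_one_iff base num hb hn).mp hs
    refine ⟨j, ?_, he⟩
    by_contra hj
    have hj1 : j ≤ 1 := by omega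
    interval_cases j
    · simp only [pow_zero] at he; omega
    · rw [pow_one] at he; nlinarith

theorem tail_eq (num : Int) :
    (if PySem.Int.bitLength num = 0 then true
     else decide (|num - 2 ^ (PySem.Int.bitLength num - 1)| < 1000))
    = decide (|2 * num - 2 ^ PySem.Int.bitLength num| < 2000) := by
  rcases h : PySem.Int.bitLength num with _ | m
  · have h1 := PySem.Int.lt_two_pow_bitLength num
    rw [h] at h1
    have hz : num = 0 := by omega
    subst hz
    norm_num
  · have hp : (2:Int) ^ (m + 1) = 2 * 2 ^ m := by ring
    simp only [Nat.add_sub_cancel, hp, if_neg (Nat.succ_ne_zero m)]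
    have hiff : (|num - 2 ^ m| < 1000) ↔ (|2 * num - 2 * 2 ^ m| < 2000) := by
      rw [abs_lt, abs_lt]; omega
    simp only [hiff]

-- ===== VERDICT (by name: the statement is the Claim_ definition above) =====
theorem is_interesting_number_spec : Claim_equal_is_interesting_number := by
  intro num _
  unfold Spec_is_interesting_number is_interesting_number is_interesting_number_alt
  simp only [List.any_cons, List.any_nil, Bool.or_false]
  rw [loop_eq 2 num (by norm_num), loop_eq 3 num (by norm_num), loop_eq 5 num (by norm_num),
      loop_eq 7 num (by norm_num), loop_eq 11 num (by norm_num), ← tail_eq num]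
  cases h2 : (decide (2 * 2 ≤ num) && (stripLoop 2 num == 1)) <;>
  cases h3 : (decide (3 * 3 ≤ num) && (stripLoop 3 num == 1)) <;>
  cases h5 : (decide (5 * 5 ≤ num) && (stripLoop 5 num == 1)) <;>
  cases h7 : (decide (7 * 7 ≤ num) && (stripLoop 7 num == 1)) <;>
  cases h11 : (decide (11 * 11 ≤ num) && (stripLoop 11 num == 1)) <;> simp
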